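-- pv_equiv track=rewrite | github.com/sidharth3/InstaScrapBot | test.py | spiralOrderPrimes
-- ===== SOURCE A (Python) =====
-- import math
-- import math
--
-- def spiralOrderPrimes(grid):
--     m = len(grid)
--     n = len(grid[0])
--     output = []
--     res=[]
--     k = 0
--     l = 0
--     while(k<m and l<n):
--         for i in range(l, n):
--             output.append(grid[k][i])
--         k+=1
--         for i in range(k,m):
--             output.append(grid[i][n-1])
--         n-=1
--
--         if(k<m):
--             for i in range(n-1, (l-1), -1):
--                 output.append(grid[m-1][i])
--             m-=1
--         if(l<n):
--             for i in range(m-1, k-1, -1):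
--                 output.append(grid[i][l])
--             l+=1
--
--     for i in output:
--         if(is_prime(i)== True):
--             res.append(i)
--     return res
--
-- def is_prime(n):
--     if n <= 1:
--         return False
--
--     max = math.floor(math.sqrt(n))
--     for i in range(2, 1 + max):
--         if n % i == 0:
--             return False
--     return True
-- ===== SOURCE B (Python) =====
-- import math
--
-- def spiralOrderPrimes(grid):
--     n = len(grid[0])
--     g = [row[:n] for row in grid]
--     cells = []
--     while g:
--         cells += g[0]
--         g = [list(col) for col in zip(*g[1:])][::-1]
--     return [v for v in cells
--             if v > 1 and all(v % i for i in range(2, math.isqrt(v) + 1))]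
-- ===== Notes on version B (the rewrite author's own statement) =====
-- stated objective: simpler
-- what changed: A's boundary-index while loop (four shrinking-bound segment loops over k,l,m,n) is replaced by the rotate-and-peel spiral: take the first row, rotate the remainder counterclockwise with zip(*g[1:])[::-1], repeat; primes are kept by a comprehension using math.isqrt instead of the explicit trial-division loop with floor(sqrt).
import Mathlib
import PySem

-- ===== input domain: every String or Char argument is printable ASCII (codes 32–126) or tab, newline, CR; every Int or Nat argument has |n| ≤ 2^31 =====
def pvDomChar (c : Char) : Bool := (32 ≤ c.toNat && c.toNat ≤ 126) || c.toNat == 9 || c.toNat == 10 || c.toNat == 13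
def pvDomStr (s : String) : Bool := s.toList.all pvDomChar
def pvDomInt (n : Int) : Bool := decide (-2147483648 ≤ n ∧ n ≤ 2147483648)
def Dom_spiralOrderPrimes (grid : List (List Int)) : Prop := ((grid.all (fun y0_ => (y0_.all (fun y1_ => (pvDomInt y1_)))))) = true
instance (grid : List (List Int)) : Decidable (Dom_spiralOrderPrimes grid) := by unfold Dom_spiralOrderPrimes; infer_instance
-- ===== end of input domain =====

-- B replaces A's boundary-index while loop by the rotate-and-peel spiral (take first
-- row, rotate the rest counterclockwise, repeat); objective: simpler. Equivalence is
-- claimed on Pre_ (nonempty grid, no row shorter than the first row = exactly where A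
-- returns; elsewhere A raises IndexError).

-- ===== PORT A =====
-- grid[i][j]; under Pre_ every index used by the loop is in range, where getD equals
-- Python indexing exactly.
def pvCell (grid : List (List Int)) (i j : Nat) : Int := (grid.getD i []).getD j 0

-- the for-loop of is_prime: for i in range(...): if n % i == 0: return False
def isPrimeLoopA (n : Int) : List Nat → Bool
  | [] => true
  | i :: is => if PySem.Int.mod n (i : Int) == 0 then false else isPrimeLoopA n is

-- math.floor(math.sqrt(n)) = Nat.sqrt n.toNat exactly for 2 ≤ n ≤ 2^31 (Dom);
-- range(2, 1 + max) = List.range' 2 (max - 1).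
def isPrimeA (n : Int) : Bool :=
  if n ≤ 1 then false
  else isPrimeLoopA n (List.range' 2 (Nat.sqrt n.toNat - 1))

-- A's while loop; k,l,m,n stay ≥ 0 in Python, so Nat state is exact, and the three
-- descending ranges range(x-1, y-1, -1) are (List.range' y (x-y)).reverse.
-- fuel is only a totality guard (the caller's m+n+1 is proven sufficient below).
def spiralLoop : Nat → List (List Int) → Nat → Nat → Nat → Nat → List Int → List Int
  | 0, _, _, _, _, _, output => output
  | fuel+1, grid, m, n, k, l, output =>
    if k < m ∧ l < n then
      spiralLoop fuel grid (if k+1 < m then m-1 else m) (n-1) (k+1) (if l < n-1 then l+1 else l)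
        ((((output
          ++ (List.range' l (n-l)).map (fun j => pvCell grid k j))
          ++ (List.range' (k+1) (m-(k+1))).map (fun i => pvCell grid i (n-1)))
          ++ (if k+1 < m then ((List.range' l ((n-1)-l)).reverse).map (fun j => pvCell grid (m-1) j) else []))
          ++ (if l < n-1 then ((List.range' (k+1) ((if k+1 < m then m-1 else m)-(k+1))).reverse).map (fun i => pvCell grid i l) else []))
    else output

def spiralOrderPrimes (grid : List (List Int)) : List Int :=
  let m := grid.length
  let n := (grid.getD 0 []).length   -- len(grid[0]); IndexError on [] is excluded by Pre_
  let output := spiralLoop (m+n+1) grid m n 0 0 []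
  output.foldl (fun res i => if isPrimeA i then res ++ [i] else res) []

-- ===== PORT B =====
-- zip(*rows): truncates at the shortest row, like Python's zip
def headsTails : List (List Int) → Option (List Int × List (List Int))
  | [] => some ([], [])
  | [] :: _ => none
  | (x :: xs) :: rs =>
      match headsTails rs with
      | none => none
      | some (hs, ts) => some (x :: hs, xs :: ts)

def zipTAux : List Int → List (List Int) → List (List Int)
  | [], _ => []
  | x :: xs, rs =>
      match headsTails rs with
      | none => []
      | some (hs, ts) => (x :: hs) :: zipTAux xs ts

def zipT : List (List Int) → List (List Int)
  | [] => []
  | r :: rs => zipTAux r rs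

-- Source B's `while g:` loop; fuel is only a totality guard (m + n + 1 is proven enough below)
def peelF : Nat → List (List Int) → List Int → List Int
  | 0, _, acc => acc
  | _+1, [], acc => acc
  | fuel+1, r :: rest, acc => peelF fuel ((zipT rest).reverse) (acc ++ r)

-- v > 1 and all(v % i for i in range(2, math.isqrt(v) + 1))
def isPrimeB (v : Int) : Bool :=
  decide (1 < v) && (List.range' 2 (Nat.sqrt v.toNat - 1)).all (fun i => PySem.Int.mod v (i : Int) != 0)

def spiralOrderPrimes_alt (grid : List (List Int)) : List Int :=
  let n := (grid.getD 0 []).length          -- len(grid[0]); IndexError on [] excluded by Pre_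
  let g := grid.map (fun row => row.take n) -- row[:n] with 0 ≤ n: exactly take
  let cells := peelF (grid.length + n + 1) g []
  cells.filter isPrimeB

-- ===== PRECONDITION & SPEC =====
-- Pre_ excludes exactly the inputs where A raises IndexError: the empty grid
-- (grid[0]) and grids with some row shorter than the first row (grid[i][n-1]).
def Pre_spiralOrderPrimes (grid : List (List Int)) : Prop :=
  grid ≠ [] ∧ ∀ row ∈ grid, (grid.getD 0 []).length ≤ row.length

instance (grid : List (List Int)) : Decidable (Pre_spiralOrderPrimes grid) := by
  unfold Pre_spiralOrderPrimes; infer_instance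

def pvWitness_spiralOrderPrimes : List (List Int) := [[2, 3], [5, 7]]

def Spec_spiralOrderPrimes (grid : List (List Int)) (out : List Int) : Prop := out = spiralOrderPrimes_alt grid
instance (grid : List (List Int)) (out : List Int) : Decidable (Spec_spiralOrderPrimes grid out) := by unfold Spec_spiralOrderPrimes; infer_instance

-- ===== CLAIM (what is proved, stated in full; the proofs are below) =====
def Claim_equal_spiralOrderPrimes : Prop := ∀ (grid : List (List Int)), Dom_spiralOrderPrimes grid → Pre_spiralOrderPrimes grid → Spec_spiralOrderPrimes grid (spiralOrderPrimes grid)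

-- ===== LEMMAS AND PROOFS =====

-- the submatrix of grid with rows [k, m) and columns [l, n)
def pvSub (grid : List (List Int)) (k l m n : Nat) : List (List Int) :=
  (List.range' k (m - k)).map (fun i => (List.range' l (n - l)).map (fun j => pvCell grid i j))

theorem peelF_nil (F : Nat) (acc : List Int) : peelF F [] acc = acc := by
  cases F <;> rfl

theorem zipT_firstnil (M : List (List Int)) (h : ∀ r ∈ M, r = ([] : List Int)) :
    zipT M = [] := by
  cases M with
  | nil => rfl
  | cons r rest =>
    have := h r (by simp)
    subst this
    rfl

theorem peelF_emptyrows (F : Nat) (M : List (List Int)) (h : ∀ r ∈ M, r = ([] : List Int))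
    (acc : List Int) : peelF F M acc = acc := by
  cases F with
  | zero => rfl
  | succ F =>
    cases M with
    | nil => rfl
    | cons r rest =>
      have hr := h r (by simp)
      subst hr
      simp only [peelF, List.append_nil]
      rw [zipT_firstnil rest (fun r hr => h r (by simp [hr]))]
      simp [peelF_nil]

theorem headsTails_map (A : List Nat) (g : Nat → Int) (t : Nat → List Int) :
    headsTails (A.map fun i => g i :: t i) = some (A.map g, A.map t) := by
  induction A with
  | nil => rfl
  | cons a A ih => simp [headsTails, ih]

theorem zipTAux_shape (B : List Nat) (a : Nat) (A' : List Nat) (f : Nat → Nat → Int) :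
    zipTAux (B.map (f a)) (A'.map fun i => B.map (f i)) =
      B.map (fun j => (a :: A').map fun i => f i j) := by
  induction B with
  | nil => rfl
  | cons b B ih =>
    simp only [List.map_cons, zipTAux]
    rw [show (fun i => f i b :: List.map (f i) B) = (fun i => (fun i => f i b) i :: (fun i => List.map (f i) B) i) from rfl]
    rw [headsTails_map A' (fun i => f i b) (fun i => List.map (f i) B)]
    simp only []
    rw [ih]
    simp

theorem zipT_shape (A B : List Nat) (f : Nat → Nat → Int) (hA : A ≠ []) :
    zipT (A.map fun i => B.map (f i)) = B.map fun j => A.map fun i => f i j := by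
  cases A with
  | nil => exact absurd rfl hA
  | cons a A' =>
    simp only [List.map_cons, zipT]
    exact zipTAux_shape B a A' f

theorem peelF_acc (F : Nat) (M : List (List Int)) (acc : List Int) :
    peelF F M acc = acc ++ peelF F M [] := by
  induction F generalizing M acc with
  | zero => simp [peelF]
  | succ F ih =>
    cases M with
    | nil => simp [peelF]
    | cons r rest =>
      simp only [peelF]
      rw [ih _ (acc ++ r), ih _ ([] ++ r)]
      simp

-- one step of Source B's loop on an index-shaped matrix
theorem peel_step (F : Nat) (a : Nat) (A B : List Nat) (f : Nat → Nat → Int) (acc : List Int) :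
    peelF (F+1) ((a :: A).map fun i => B.map (f i)) acc
      = if A = [] then acc ++ B.map (f a)
        else peelF F (B.reverse.map fun j => A.map (fun i => f i j)) (acc ++ B.map (f a)) := by
  simp only [List.map_cons, peelF]
  by_cases hA : A = []
  · subst hA
    simp [zipT, peelF_nil]
  · rw [if_neg hA, zipT_shape A B f hA, ← List.map_reverse]

theorem spiralLoop_stop (f : Nat) (grid : List (List Int)) (m n k l : Nat) (out : List Int)
    (h : ¬ (k < m ∧ l < n)) : spiralLoop f grid m n k l out = out := by
  cases f with
  | zero => rfl
  | succ f => simp only [spiralLoop, if_neg h]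

-- A's loop equals peeling the corresponding submatrix, for any sufficient fuel on both sides.
theorem loop_peel (grid : List (List Int)) :
    ∀ μ fa m n k l (out : List Int) (F : Nat), (m - k) + (n - l) = μ → μ ≤ 2 * fa → μ ≤ F →
      spiralLoop fa grid m n k l out = out ++ peelF F (pvSub grid k l m n) [] := by
  intro μ
  induction μ using Nat.strong_induction_on with
  | _ μ IH =>
  intro fa m n k l out F hμ hfa hF
  by_cases h : k < m ∧ l < n
  case neg =>
    rw [spiralLoop_stop _ _ _ _ _ _ _ h]
    unfold pvSub
    by_cases hk : k < m
    · have hn : n - l = 0 := by omega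
      rw [hn]
      rw [peelF_emptyrows _ _ (by intro r hr; simp at hr; obtain ⟨i, _, rfl⟩ := hr; simp)]
      simp
    · have hm : m - k = 0 := by omega
      rw [hm]
      simp [peelF_nil]
  case pos =>
  obtain ⟨hkm, hln⟩ := h
  obtain ⟨fa', rfl⟩ : ∃ fa', fa = fa' + 1 := ⟨fa - 1, by omega⟩
  simp only [spiralLoop, if_pos (show k < m ∧ l < n from ⟨hkm, hln⟩)]
  unfold pvSub
  obtain ⟨F1, rfl⟩ : ∃ F1, F = F1 + 1 := ⟨F - 1, by omega⟩
  rw [show m - k = (m - (k+1)) + 1 from by omega, List.range'_succ,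
      peel_step F1 k (List.range' (k+1) (m-(k+1))) (List.range' l (n-l)) (fun i j => pvCell grid i j)]
  by_cases hm1 : k + 1 < m
  case neg =>
    -- (a) single row: m = k + 1
    rw [if_pos (show List.range' (k+1) (m-(k+1)) = [] by
          simp only [List.range'_eq_nil_iff]; omega)]
    rw [spiralLoop_stop _ _ _ _ _ _ _ (by split_ifs <;> omega)]
    simp only [if_neg hm1, show m - (k+1) = 0 from by omega, List.range'_zero,
      List.reverse_nil, List.map_nil, List.append_nil, ite_self]
    simp
  case pos =>
  rw [if_neg (show ¬ List.range' (k+1) (m-(k+1)) = [] by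
        simp only [List.range'_eq_nil_iff]; omega)]
  -- reverse of the column range: (n-1) :: (range' l ((n-1)-l)).reverse
  rw [show n - l = ((n-1) - l) + 1 from by omega, List.range'_concat,
      List.reverse_append, List.reverse_singleton, List.singleton_append,
      show l + 1 * ((n-1) - l) = n - 1 from by omega]
  obtain ⟨F2, rfl⟩ : ∃ F2, F1 = F2 + 1 := ⟨F1 - 1, by omega⟩
  rw [peel_step F2 (n-1) ((List.range' l ((n-1)-l)).reverse) (List.range' (k+1) (m-(k+1)))
        (fun j i => pvCell grid i j)]
  by_cases hn1 : l < n - 1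
  case neg =>
    -- (b) single column: n = l + 1
    rw [if_pos (show (List.range' l ((n-1)-l)).reverse = [] by
          simp only [List.reverse_eq_nil_iff, List.range'_eq_nil_iff]; omega)]
    rw [spiralLoop_stop _ _ _ _ _ _ _ (by split_ifs; omega)]
    simp only [if_pos hm1, if_neg hn1, show (n-1) - l = 0 from by omega, List.range'_zero,
      List.reverse_nil, List.map_nil, List.append_nil]
    simp
  case pos =>
  rw [if_neg (show ¬ (List.range' l ((n-1)-l)).reverse = [] by
        simp only [List.reverse_eq_nil_iff, List.range'_eq_nil_iff]; omega)]
  -- reverse of the row range: (m-1) :: (range' (k+1) ((m-1)-(k+1))).reverse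
  rw [show m - (k+1) = ((m-1) - (k+1)) + 1 from by omega,
      List.range'_concat, List.reverse_append, List.reverse_singleton, List.singleton_append,
      show (k+1) + 1 * ((m-1) - (k+1)) = m - 1 from by omega]
  obtain ⟨F3, rfl⟩ : ∃ F3, F2 = F3 + 1 := ⟨F2 - 1, by omega⟩
  rw [peel_step F3 (m-1) ((List.range' (k+1) ((m-1)-(k+1))).reverse)
        ((List.range' l ((n-1)-l)).reverse) (fun i j => pvCell grid i j)]
  by_cases hm2 : k + 1 < m - 1
  case neg =>
    -- (c1) exactly two rows: m = k + 2
    rw [if_pos (show (List.range' (k+1) ((m-1)-(k+1))).reverse = [] by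
          simp only [List.reverse_eq_nil_iff, List.range'_eq_nil_iff]; omega)]
    rw [spiralLoop_stop _ _ _ _ _ _ _ (by split_ifs; omega)]
    simp only [if_pos hm1, if_pos hn1, show (m-1) - (k+1) = 0 from by omega, List.range'_zero,
      List.reverse_nil, List.map_nil, List.append_nil]
    simp
  case pos =>
  rw [if_neg (show ¬ (List.range' (k+1) ((m-1)-(k+1))).reverse = [] by
        simp only [List.reverse_eq_nil_iff, List.range'_eq_nil_iff]; omega)]
  rw [List.reverse_reverse, show (n-1) - l = ((n-1) - (l+1)) + 1 from by omega,
      List.range'_succ]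
  obtain ⟨F4, rfl⟩ : ∃ F4, F3 = F4 + 1 := ⟨F3 - 1, by omega⟩
  rw [peel_step F4 l (List.range' (l+1) ((n-1)-(l+1))) ((List.range' (k+1) ((m-1)-(k+1))).reverse)
        (fun j i => pvCell grid i j)]
  by_cases hn2 : l + 1 < n - 1
  case neg =>
    -- (c2) exactly two columns: n = l + 2
    rw [if_pos (show List.range' (l+1) ((n-1)-(l+1)) = [] by
          simp only [List.range'_eq_nil_iff]; omega)]
    rw [spiralLoop_stop _ _ _ _ _ _ _ (by split_ifs; omega)]
    simp only [if_pos hm1, if_pos hn1]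
    simp
  case pos =>
  rw [if_neg (show ¬ List.range' (l+1) ((n-1)-(l+1)) = [] by
        simp only [List.range'_eq_nil_iff]; omega)]
  rw [List.reverse_reverse]
  rw [show ((List.range' (k+1) ((m-1)-(k+1))).map
        (fun i => (List.range' (l+1) ((n-1)-(l+1))).map (fun j => pvCell grid i j)))
      = pvSub grid (k+1) (l+1) (m-1) (n-1) from rfl]
  rw [peelF_acc]
  simp only [if_pos hm1, if_pos hn1]
  rw [IH (((m-1) - (k+1)) + ((n-1) - (l+1))) (by omega) fa' (m-1) (n-1) (k+1) (l+1) _ F4 rfl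
        (by omega) (by omega)]
  simp

theorem foldl_filterA (xs : List Int) (acc : List Int) :
    xs.foldl (fun res i => if isPrimeA i then res ++ [i] else res) acc
      = acc ++ xs.filter isPrimeA := by
  induction xs generalizing acc with
  | nil => simp
  | cons x xs ih =>
    simp only [List.foldl, List.filter]
    by_cases h : isPrimeA x <;> simp [h, ih]

theorem isPrimeLoopA_all (n : Int) (L : List Nat) :
    isPrimeLoopA n L = L.all (fun i => PySem.Int.mod n (i : Int) != 0) := by
  induction L with
  | nil => rfl
  | cons i L ih =>
    simp only [isPrimeLoopA, List.all_cons, ih]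
    by_cases h : PySem.Int.mod n (i : Int) == 0
    · simp_all
    · simp_all

theorem isPrime_eq : isPrimeA = isPrimeB := by
  funext v
  unfold isPrimeA isPrimeB
  by_cases h : v ≤ 1
  · simp [h, show ¬ (1 < v) by omega]
  · simp [h, show 1 < v by omega, isPrimeLoopA_all]

theorem trim_eq_sub (grid : List (List Int)) (n0 : Nat)
    (hrect : ∀ row ∈ grid, n0 ≤ row.length) :
    grid.map (fun row => row.take n0) = pvSub grid 0 0 grid.length n0 := by
  unfold pvSub
  apply List.ext_getElem
  · simp
  · intro i h1 h2
    simp only [List.length_map] at h1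
    have hri : n0 ≤ (grid[i]).length := hrect _ (List.getElem_mem h1)
    simp only [List.getElem_map, Nat.sub_zero, List.getElem_range', Nat.zero_add, Nat.one_mul]
    apply List.ext_getElem
    · simp only [List.length_take, List.length_map, List.length_range']
      omega
    · intro j hj1 hj2
      simp only [List.length_take] at hj1
      simp only [List.getElem_take, List.getElem_map, List.getElem_range', Nat.zero_add,
        Nat.one_mul]
      unfold pvCell
      rw [List.getD_eq_getElem _ _ h1, List.getD_eq_getElem _ _ (by omega)]

-- ===== VERDICT (by name: the statement is the Claim_ definition above) =====
theorem spiralOrderPrimes_spec : Claim_equal_spiralOrderPrimes := by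
  intro grid _hDom hPre
  obtain ⟨hne, hrect⟩ := hPre
  unfold Spec_spiralOrderPrimes spiralOrderPrimes spiralOrderPrimes_alt
  simp only []
  rw [foldl_filterA, List.nil_append, isPrime_eq,
      trim_eq_sub grid ((grid.getD 0 []).length) hrect,
      loop_peel grid ((grid.length - 0) + ((grid.getD 0 []).length - 0))
        (grid.length + (grid.getD 0 []).length + 1)
        grid.length ((grid.getD 0 []).length) 0 0 [] (grid.length + (grid.getD 0 []).length + 1)
        rfl (by omega) (by omega)]
  simp
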